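-- pv_equiv track=rewrite | github.com/facebookincubator/Bowler | bowler/helpers.py | dotted_parts
-- ===== SOURCE A (Python) =====
-- from typing import List, Optional, Sequence, Union
--
-- def dotted_parts(name: str) -> List[str]:
--     pre, dot, post = name.partition(".")
--     if post:
--         post_parts = dotted_parts(post)
--     else:
--         post_parts = []
--     result = []
--     if pre:
--         result.append(pre)
--     if pre and dot:
--         result.append(dot)
--     if post_parts:
--         result.extend(post_parts)
--     return result
-- ===== SOURCE B (Python) =====
-- def dotted_parts(name: str):
--     result = []
--     while name:
--         pre, dot, post = name.partition(".")
--         if pre: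
--             result.append(pre)
--             if dot:
--                 result.append(dot)
--         name = post
--     return result
-- ===== Notes on version B (the rewrite author's own statement) =====
-- stated objective: simpler
-- what changed: Replaces A's recursion (recurse on the text after the first dot, then concatenate pre/dot/post_parts) with a single iterative while-loop that partitions once per step and appends into one result accumulator.
import Mathlib
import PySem

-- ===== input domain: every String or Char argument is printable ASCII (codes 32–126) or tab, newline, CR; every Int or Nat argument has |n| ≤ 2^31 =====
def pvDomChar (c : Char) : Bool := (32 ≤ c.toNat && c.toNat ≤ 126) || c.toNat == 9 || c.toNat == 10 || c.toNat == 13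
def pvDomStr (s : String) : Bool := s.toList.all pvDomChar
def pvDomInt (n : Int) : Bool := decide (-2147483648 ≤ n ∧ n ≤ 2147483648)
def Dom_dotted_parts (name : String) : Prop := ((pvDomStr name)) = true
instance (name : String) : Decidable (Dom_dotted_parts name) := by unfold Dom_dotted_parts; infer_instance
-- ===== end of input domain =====

-- B replaces A's tail recursion by an explicit accumulator loop (simpler, iterative decomposition); same return value.

-- name.partition(".") : (pre, some post) if a '.' occurs (post = text after the first '.'),
-- (pre, none) if not.  Exact for the single-character separator ".".
def partDot : List Char → List Char × Option (List Char)
  | [] => ([], none)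
  | c :: cs =>
    if c = '.' then ([], some cs)
    else
      let (p, r) := partDot cs
      (c :: p, r)

-- self-contained helper used by both ports' termination proofs
theorem partDot_some_length : ∀ (l p r : List Char), partDot l = (p, some r) → r.length < l.length := by
  intro l
  induction l with
  | nil => intro p r h; simp [partDot] at h
  | cons c cs ih =>
    intro p r h
    by_cases hc : c = '.'
    · simp [partDot, hc] at h
      obtain ⟨-, h2⟩ := h
      subst h2
      simp
    · simp [partDot, hc] at h
      have := ih (partDot cs).1 r (by rw [← h.2])
      simp only [List.length_cons]
      omega

-- ===== PORT A =====
-- Recursive, as in A: pre, dot, post = name.partition("."); recurse on post; build result by appends.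
-- 'if pre and dot' holds iff pre ≠ "" in the some-branch (dot = "." there), dot = "" in the none-branch.
def dottedA (l : List Char) : List String :=
  match h : partDot l with
  | (pre, none) =>
    -- post empty: post_parts = []; result gets pre if nonempty, no dot, nothing from post_parts
    (if pre ≠ [] then [String.ofList pre] else [])
  | (pre, some post) =>
    (if pre ≠ [] then [String.ofList pre] else []) ++
    (if pre ≠ [] then ["."] else []) ++
    dottedA post
termination_by l.length
decreasing_by exact partDot_some_length l _ _ h

def dotted_parts (name : String) : List String := dottedA name.toList

-- ===== PORT B =====
-- B's while loop: carry the result accumulator; name := post each iteration; stop when name = "".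
def dottedBLoop (l : List Char) (acc : List String) : List String :=
  match l with
  | [] => acc
  | c :: cs =>
    match _h : partDot (c :: cs) with
    | (pre, none) =>
      dottedBLoop [] (if pre ≠ [] then acc ++ [String.ofList pre] else acc)
    | (pre, some post) =>
      dottedBLoop post (if pre ≠ [] then acc ++ [String.ofList pre, "."] else acc)
termination_by l.length
decreasing_by
  · simp
  · exact partDot_some_length _ _ _ _h

def dotted_parts_alt (name : String) : List String := dottedBLoop name.toList []

-- ===== PRECONDITION & SPEC =====
def Spec_dotted_parts (name : String) (out : List String) : Prop := out = dotted_parts_alt name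
instance (name : String) (out : List String) : Decidable (Spec_dotted_parts name out) := by unfold Spec_dotted_parts; infer_instance

-- ===== CLAIM (what is proved, stated in full; the proofs are below) =====
def Claim_equal_dotted_parts : Prop := ∀ (name : String), Dom_dotted_parts name → Spec_dotted_parts name (dotted_parts name)

-- ===== LEMMAS AND PROOFS =====
theorem dottedA_none (l pre : List Char) (h : partDot l = (pre, none)) :
    dottedA l = (if pre ≠ [] then [String.ofList pre] else []) := by
  rw [dottedA.eq_def]; split <;> simp_all

theorem dottedA_some (l pre post : List Char) (h : partDot l = (pre, some post)) :
    dottedA l = (if pre ≠ [] then [String.ofList pre] else []) ++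
      (if pre ≠ [] then ["."] else []) ++ dottedA post := by
  rw [dottedA.eq_def]; split <;> simp_all

theorem dottedBLoop_eq (l : List Char) (acc : List String) :
    dottedBLoop l acc = acc ++ dottedA l := by
  fun_induction dottedBLoop l acc with
  | case1 acc => rw [dottedA_none [] [] (by simp [partDot])]; simp
  | case2 acc c cs pre _h ih =>
    simp only [dite_eq_ite] at ih
    rw [ih, dottedA_none _ _ _h, dottedA_none ([] : List Char) [] (by simp [partDot])]
    split_ifs <;> simp_all
  | case3 acc c cs pre post _h ih =>
    simp only [dite_eq_ite] at ih
    rw [ih, dottedA_some _ _ _ _h]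
    split_ifs <;> simp_all

-- ===== VERDICT (by name: the statement is the Claim_ definition above) =====
theorem dotted_parts_spec : Claim_equal_dotted_parts := by
  intro name _
  unfold Spec_dotted_parts dotted_parts dotted_parts_alt
  rw [dottedBLoop_eq]
  simp
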